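-- pv_equiv track=rewrite | github.com/koreabeginner96/CordingTest | 2023_04_05/pro_1_RoughlyKeyboard.py | solution
-- ===== SOURCE A (Python) =====
-- def solution(keymap, targets):
--     answer = []
--     sum=0
--     key_dict = {}
--     for o in keymap:
--         for i,key in enumerate(o):
--             if key not in key_dict:
--                 key_dict[key] = i+1
--             else:
--                 key_dict[key]= min(key_dict[key],i+1)
--     for i in targets:
--         sum=0
--         for j in i:
--             if j not in key_dict:
--                 sum= -1
--                 break
--
--             sum +=key_dict[j]
--         answer.append(sum)
--     return answer
-- ===== SOURCE B (Python) =====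
-- def _first_pos(km, ch):
--     pos = 1
--     for k in km:
--         if k == ch:
--             return pos
--         pos += 1
--     return None
--
-- def solution(keymap, targets):
--     answer = []
--     for t in targets:
--         cost = 0
--         for ch in t:
--             best = None
--             for km in keymap:
--                 p = _first_pos(km, ch)
--                 if p is not None:
--                     if best is None or p < best:
--                         best = p
--             if best is None:
--                 cost = -1
--                 break
--             cost += best
--         answer.append(cost)
--     return answer
-- ===== Notes on version B (the rewrite author's own statement) =====
-- stated objective: alternative
-- what changed: B drops A's precomputed per-character min-position dictionary entirely and instead, for each target character, scans every keymap string on the fly for the minimum 1-based first-occurrence position.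
import Mathlib
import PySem

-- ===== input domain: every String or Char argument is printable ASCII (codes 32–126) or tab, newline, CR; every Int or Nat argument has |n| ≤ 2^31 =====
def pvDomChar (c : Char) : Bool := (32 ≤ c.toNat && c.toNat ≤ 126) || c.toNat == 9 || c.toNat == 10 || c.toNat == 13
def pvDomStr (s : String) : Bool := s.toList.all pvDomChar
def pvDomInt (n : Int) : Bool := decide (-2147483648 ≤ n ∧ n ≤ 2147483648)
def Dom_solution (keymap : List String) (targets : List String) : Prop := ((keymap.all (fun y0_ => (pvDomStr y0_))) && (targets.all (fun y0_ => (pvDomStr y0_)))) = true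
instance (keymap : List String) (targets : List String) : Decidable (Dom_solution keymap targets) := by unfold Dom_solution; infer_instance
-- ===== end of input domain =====

-- B replaces A's precomputed per-character index dict by a direct per-character scan of all
-- keymap strings (objective: alternative decomposition, same results, no speed claim).

-- ===== PORT A =====
-- inner 'for j in i' loop with its break ('sum = -1; break' → result -1)
def sumLoopA (d : PySem.Dict Char Int) : List Char → Int → Int
  | [], s => s
  | j :: rest, s =>
    match d.get? j with
    | none => -1
    | some v => sumLoopA d rest (s + v)

def solution (keymap : List String) (targets : List String) : List Int :=
  let key_dict : PySem.Dict Char Int :=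
    keymap.foldl (fun d o =>
      (PySem.List.enumerate o.toList 0).foldl (fun d ik =>
        match d.get? ik.2 with
        | none => d.insert ik.2 (ik.1 + 1)
        | some v => d.insert ik.2 (min v (ik.1 + 1))) d) PySem.Dict.empty
  targets.foldl (fun answer i => answer ++ [sumLoopA key_dict i.toList 0]) []

-- ===== PORT B =====
-- _first_pos: 1-based position of the first occurrence of ch in km, None if absent
def firstPos : List Char → Int → Char → Option Int
  | [], _, _ => none
  | k :: rest, pos, ch => if k = ch then some pos else firstPos rest (pos + 1) ch

-- the 'for km in keymap' scan computing best
def bestPos (keymap : List String) (ch : Char) : Option Int :=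
  keymap.foldl (fun best km =>
    match firstPos km.toList 1 ch with
    | none => best
    | some p =>
      match best with
      | none => some p
      | some b => if p < b then some p else best) none

-- the 'for ch in t' loop with its break
def costLoopB (keymap : List String) : List Char → Int → Int
  | [], cost => cost
  | ch :: rest, cost =>
    match bestPos keymap ch with
    | none => -1
    | some p => costLoopB keymap rest (cost + p)

def solution_alt (keymap : List String) (targets : List String) : List Int :=
  targets.foldl (fun answer t => answer ++ [costLoopB keymap t.toList 0]) []

-- ===== PRECONDITION & SPEC =====
def Spec_solution (keymap : List String) (targets : List String) (out : List Int) : Prop := out = solution_alt keymap targets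
instance (keymap : List String) (targets : List String) (out : List Int) : Decidable (Spec_solution keymap targets out) := by unfold Spec_solution; infer_instance

-- ===== CLAIM (what is proved, stated in full; the proofs are below) =====
def Claim_equal_solution : Prop := ∀ (keymap : List String) (targets : List String), Dom_solution keymap targets → Spec_solution keymap targets (solution keymap targets)

-- ===== LEMMAS AND PROOFS =====

-- optional-minimum combinator describing both programs' aggregation
def omin : Option Int → Option Int → Option Int
  | none, b => b
  | some a, none => some a
  | some a, some b => some (min a b)

theorem omin_none_right (a : Option Int) : omin a none = a := by cases a <;> rfl

theorem firstPos_bound (km : List Char) (pos : Int) (ch : Char) (v : Int)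
    (h : firstPos km pos ch = some v) : pos ≤ v := by
  induction km generalizing pos with
  | nil => simp [firstPos] at h
  | cons k rest ih =>
    simp only [firstPos] at h
    split at h
    · cases h; omega
    · have := ih (pos + 1) h; omega

-- A's inner enumerate loop, seen through get?
theorem innerA_get? (o : List Char) (s : Int) (d : PySem.Dict Char Int) (c : Char) :
    ((PySem.List.enumerate o s).foldl (fun d ik =>
        match d.get? ik.2 with
        | none => d.insert ik.2 (ik.1 + 1)
        | some v => d.insert ik.2 (min v (ik.1 + 1))) d).get? c
      = omin (d.get? c) (firstPos o (s + 1) c) := by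
  induction o generalizing s d with
  | nil => simp [PySem.List.enumerate_nil, firstPos, omin_none_right]
  | cons x rest ih =>
    rw [PySem.List.enumerate_cons]
    simp only [List.foldl_cons]
    rw [ih]
    by_cases hx : x = c
    · subst hx
      have hd : ((match d.get? x with
            | none => d.insert x (s + 1)
            | some v => d.insert x (min v (s + 1))) : PySem.Dict Char Int).get? x
          = omin (d.get? x) (some (s + 1)) := by
        cases hdx : d.get? x with
        | none => simp [PySem.Dict.get?_insert_self, omin]
        | some v => simp [PySem.Dict.get?_insert_self, omin]
      rw [hd]
      simp only [firstPos, if_true]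
      cases hr : firstPos rest (s + 1 + 1) x with
      | none => simp [omin_none_right]
      | some v =>
        have hv := firstPos_bound _ _ _ _ hr
        cases hdx : d.get? x <;> simp [omin] <;> omega
    · have hd : ((match d.get? x with
            | none => d.insert x (s + 1)
            | some v => d.insert x (min v (s + 1))) : PySem.Dict Char Int).get? c
          = d.get? c := by
        cases hdx : d.get? x with
        | none => simp [PySem.Dict.get?_insert_of_ne _ _ (Ne.symm hx)]
        | some v => simp [PySem.Dict.get?_insert_of_ne _ _ (Ne.symm hx)]
      rw [hd]
      simp [firstPos, hx]

-- A's whole dict-building loop, seen through get?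
theorem buildA_get? (keymap : List String) (d : PySem.Dict Char Int) (c : Char) :
    (keymap.foldl (fun d o =>
        (PySem.List.enumerate o.toList 0).foldl (fun d ik =>
          match d.get? ik.2 with
          | none => d.insert ik.2 (ik.1 + 1)
          | some v => d.insert ik.2 (min v (ik.1 + 1))) d) d).get? c
      = keymap.foldl (fun acc km => omin acc (firstPos km.toList 1 c)) (d.get? c) := by
  induction keymap generalizing d with
  | nil => rfl
  | cons o rest ih =>
    simp only [List.foldl_cons]
    rw [ih, innerA_get? o.toList 0 d c]
    norm_num

-- B's scan step is exactly omin
theorem bestPos_eq_foldl_omin (keymap : List String) (c : Char) (acc : Option Int) :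
    keymap.foldl (fun best km =>
      match firstPos km.toList 1 c with
      | none => best
      | some p =>
        match best with
        | none => some p
        | some b => if p < b then some p else best) acc
    = keymap.foldl (fun acc km => omin acc (firstPos km.toList 1 c)) acc := by
  induction keymap generalizing acc with
  | nil => rfl
  | cons km rest ih =>
    simp only [List.foldl_cons]
    rw [ih]
    congr 1
    cases hp : firstPos km.toList 1 c with
    | none => simp [omin_none_right]
    | some p =>
      cases acc with
      | none => rfl
      | some b =>
        simp only [omin]
        split_ifs with h
        · congr 1; omega
        · congr 1; omega

theorem dict_eq_bestPos (keymap : List String) (c : Char) :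
    (keymap.foldl (fun d o =>
        (PySem.List.enumerate o.toList 0).foldl (fun d ik =>
          match d.get? ik.2 with
          | none => d.insert ik.2 (ik.1 + 1)
          | some v => d.insert ik.2 (min v (ik.1 + 1))) d) PySem.Dict.empty).get? c
      = bestPos keymap c := by
  rw [buildA_get?, bestPos, bestPos_eq_foldl_omin]
  simp [PySem.Dict.get?_empty]

theorem sumLoop_eq (keymap : List String) (chars : List Char) (s : Int) :
    sumLoopA (keymap.foldl (fun d o =>
        (PySem.List.enumerate o.toList 0).foldl (fun d ik =>
          match d.get? ik.2 with
          | none => d.insert ik.2 (ik.1 + 1)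
          | some v => d.insert ik.2 (min v (ik.1 + 1))) d) PySem.Dict.empty) chars s
      = costLoopB keymap chars s := by
  induction chars generalizing s with
  | nil => rfl
  | cons c rest ih =>
    simp only [sumLoopA, costLoopB, dict_eq_bestPos]
    cases bestPos keymap c with
    | none => rfl
    | some v => exact ih (s + v)

-- ===== VERDICT (by name: the statement is the Claim_ definition above) =====
theorem sol_eq (keymap : List String) (targets : List String) :
    solution keymap targets = solution_alt keymap targets := by
  unfold solution solution_alt
  induction targets using List.reverseRecOn with
  | nil => rfl
  | append_singleton ts t ih =>
    simp only [List.foldl_append, List.foldl_cons, List.foldl_nil]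
    rw [ih, sumLoop_eq]

theorem solution_spec : Claim_equal_solution := by
  intro keymap targets _
  exact sol_eq keymap targets
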